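-- pv_equiv track=rewrite | github.com/multi-ego/multi-eGO | topology_parser.py | get_sections_dict
-- ===== SOURCE A (Python) =====
-- def get_sections_dict(file_dict):
--     section_numbers = []
--     sections_dict = {}
--     for line_number, line in file_dict.items():
--         if '[' in line:
--             section_numbers.append(line_number)
--
--     end_line = (max(file_dict.keys())+1)
--     section_numbers.append(end_line)
--     counter = list(range(0, len(section_numbers)))
--
--     for number in counter:
--         if number == counter[-1]:
--             break
--         else:
--             lines = list(range(section_numbers[number], section_numbers[number+1]))
--             if (file_dict[lines[0]] =='[ dihedrals ]' and '[ dihedrals ]' in list(sections_dict.keys())):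
--                 section_name = '[ impropers ]'
--             else:
--                 section_name = file_dict[lines[0]]
--             subset_file_dict = {key: value for key, value in file_dict.items() if key in lines[1:]}
--             for k, v in subset_file_dict.items():
--                 subset_file_dict[k] = v.split()
--             sections_dict[section_name] = subset_file_dict
--             subset_file_dict = {}
--
--     return sections_dict
-- ===== SOURCE B (Python) =====
-- def get_sections_dict(file_dict):
--     headers = [(k, v) for k, v in file_dict.items() if '[' in v]
--     names = []
--     seen_dihedrals = False
--     for _, line in headers:
--         if line == '[ dihedrals ]':
--             names.append('[ impropers ]' if seen_dihedrals else line)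
--             seen_dihedrals = True
--         else:
--             names.append(line)
--     starts = [k for k, _ in headers]
--     buckets = [[] for _ in headers]
--     for k, v in file_dict.items():
--         if '[' in v:
--             continue
--         lo, hi = 0, len(starts)
--         while lo < hi:
--             mid = (lo + hi) // 2
--             if starts[mid] < k:
--                 lo = mid + 1
--             else:
--                 hi = mid
--         if lo > 0:
--             buckets[lo - 1].append((k, v.split()))
--     out = {}
--     for name, bucket in zip(names, buckets):
--         out[name] = dict(bucket)
--     return out
-- ===== Notes on version B (the rewrite author's own statement) =====
-- stated objective: alternative
-- what changed: A rescans the whole dict once per section, testing every key for membership in a materialised line-number range list; B makes a single pass over the items, assigning each line to its section by a binary search over the sorted section-start keys and collecting per-section buckets, so the per-section rescans and the range lists disappear (not measurably faster on the generated inputs, which contain few or no section headers).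
import Mathlib
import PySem

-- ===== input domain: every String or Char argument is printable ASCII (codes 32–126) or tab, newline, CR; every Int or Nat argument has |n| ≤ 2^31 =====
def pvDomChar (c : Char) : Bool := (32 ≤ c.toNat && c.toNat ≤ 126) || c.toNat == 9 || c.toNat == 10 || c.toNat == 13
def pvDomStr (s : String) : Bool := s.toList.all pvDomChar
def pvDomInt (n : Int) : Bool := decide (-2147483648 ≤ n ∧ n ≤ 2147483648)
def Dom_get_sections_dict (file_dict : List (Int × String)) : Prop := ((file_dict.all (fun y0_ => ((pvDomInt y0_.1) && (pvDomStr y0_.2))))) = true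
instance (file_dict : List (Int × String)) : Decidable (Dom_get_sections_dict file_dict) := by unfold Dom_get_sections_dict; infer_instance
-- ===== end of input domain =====

-- B replaces A's per-section scan of the whole dict (membership in a materialised
-- line-number range list) by one pass over the items with a binary search over the
-- sorted section-start keys; objective: alternative algorithm.

-- ===== PORT A =====
def get_sections_dict (file_dict : List (Int × String)) : List (String × List (Int × List String)) :=
  -- for line_number, line in file_dict.items(): if '[' in line: section_numbers.append(line_number)
  let section_numbers : List Int :=
    file_dict.foldl (fun acc p => if PySem.Str.isIn "[" p.2 then acc ++ [p.1] else acc) []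
  -- end_line = max(file_dict.keys()) + 1  (max() raises ValueError on an empty dict: excluded by Pre_)
  match PySem.List.max? (file_dict.map Prod.fst) (fun x => x) with
  | none => []
  | some mx =>
    let end_line : Int := mx + 1
    let section_numbers := section_numbers ++ [end_line]
    let counter : List Int := PySem.List.pyRange 0 ((section_numbers.length : Int)) 1
    let sections_dict : PySem.Dict String (List (Int × List String)) :=
      counter.foldl (fun sd number =>
        -- 'if number == counter[-1]: break' — the break fires exactly at the last index, so it skips that iteration
        if some number == PySem.List.pyGet? counter (-1) then sd
        else
          let lines : List Int :=
            PySem.List.pyRange (PySem.List.pyGetD section_numbers number 0)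
              (PySem.List.pyGetD section_numbers (number + 1) 0) 1
          -- file_dict[lines[0]]  (lines[0] raises IndexError on an empty range: excluded by Pre_)
          let head_line : String := (PySem.Dict.mk file_dict).getD (PySem.List.pyGetD lines 0 0) ""
          let section_name : String :=
            if head_line == "[ dihedrals ]" && sd.contains "[ dihedrals ]" then "[ impropers ]"
            else head_line
          -- {key: value for key, value in file_dict.items() if key in lines[1:]}, then v.split() on each value
          let subset := file_dict.filter (fun p => (PySem.List.slice lines (some 1) none).contains p.1)
          sd.insert section_name (subset.map (fun p => (p.1, PySem.Str.split₀ p.2)))) PySem.Dict.empty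
    sections_dict.items

-- ===== PORT B =====
-- the hand-written 'while lo < hi' binary-search loop of Source B
def pvBsearch (starts : List Int) (k : Int) (lo hi : Nat) : Nat :=
  if lo < hi then
    let mid := (lo + hi) / 2
    if starts.getD mid 0 < k then pvBsearch starts k (mid + 1) hi
    else pvBsearch starts k lo mid
  else lo
termination_by hi - lo
decreasing_by all_goals omega

def get_sections_dict_alt (file_dict : List (Int × String)) : List (String × List (Int × List String)) :=
  let headers := file_dict.filter (fun p => PySem.Str.isIn "[" p.2)
  let names : List String :=
    (headers.foldl (fun (acc : List String × Bool) p =>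
      if p.2 == "[ dihedrals ]" then
        (acc.1 ++ [if acc.2 then "[ impropers ]" else p.2], true)
      else (acc.1 ++ [p.2], acc.2)) ([], false)).1
  let starts : List Int := headers.map Prod.fst
  let buckets : List (List (Int × List String)) :=
    file_dict.foldl (fun bs p =>
      if PySem.Str.isIn "[" p.2 then bs
      else
        let lo := pvBsearch starts p.1 0 starts.length
        if 0 < lo then bs.set (lo - 1) (bs.getD (lo - 1) [] ++ [(p.1, PySem.Str.split₀ p.2)])
        else bs) (headers.map (fun _ => []))
  ((names.zip buckets).foldl
    (fun (d : PySem.Dict String (List (Int × List String))) nb => d.insert nb.1 nb.2)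
    PySem.Dict.empty).items

-- ===== PRECONDITION & SPEC =====
-- Pre_ excludes: the empty dict (A's max() raises ValueError) and dicts whose section-header
-- keys are not strictly increasing in insertion order (A's lines[0] raises IndexError on the
-- empty range); duplicate keys are excluded only because an association list with repeated
-- keys does not represent a Python dict.
def Pre_get_sections_dict (file_dict : List (Int × String)) : Prop :=
  file_dict ≠ [] ∧ (file_dict.map Prod.fst).Nodup ∧
    List.IsChain (· < ·) ((file_dict.filter (fun p => PySem.Str.isIn "[" p.2)).map Prod.fst)
instance (file_dict : List (Int × String)) : Decidable (Pre_get_sections_dict file_dict) := by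
  unfold Pre_get_sections_dict; infer_instance

def pvWitness_get_sections_dict : (List (Int × String)) :=
  [(1, "[ atoms ]"), (2, "1 2"), (4, "[ dihedrals ]"), (5, "a b c"), (7, "[ dihedrals ]"), (8, "x")]

def Spec_get_sections_dict (file_dict : List (Int × String)) (out : List (String × List (Int × List String))) : Prop := out = get_sections_dict_alt file_dict
instance (file_dict : List (Int × String)) (out : List (String × List (Int × List String))) : Decidable (Spec_get_sections_dict file_dict out) := by unfold Spec_get_sections_dict; infer_instance

-- ===== CLAIM (what is proved, stated in full; the proofs are below) =====
def Claim_equal_get_sections_dict : Prop := ∀ (file_dict : List (Int × String)), Dom_get_sections_dict file_dict → Pre_get_sections_dict file_dict → Spec_get_sections_dict file_dict (get_sections_dict file_dict)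

-- ===== LEMMAS AND PROOFS =====

-- common normal form both ports are reduced to
def pvHdr (p : Int × String) : Bool := PySem.Str.isIn "[" p.2

def pvNames (seen : Bool) : List String → List String
  | [] => []
  | l :: t =>
      (if l = "[ dihedrals ]" then (if seen then "[ impropers ]" else l) else l) ::
        pvNames (seen || (l == "[ dihedrals ]")) t

def pvIv (file_dict : List (Int × String)) (a b : Int) : List (Int × List String) :=
  (file_dict.filter (fun p => decide (a < p.1) && decide (p.1 < b))).map
    (fun p => (p.1, PySem.Str.split₀ p.2))

def pvPairs (xs : List Int) (e : Int) : List (Int × Int) := xs.zip (xs.tail ++ [e])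

def pvSecs (file_dict : List (Int × String)) (e : Int) : List (String × List (Int × List String)) :=
  (pvNames false ((file_dict.filter pvHdr).map Prod.snd)).zip
    ((pvPairs ((file_dict.filter pvHdr).map Prod.fst) e).map (fun q => pvIv file_dict q.1 q.2))

def pvDFold (sd : PySem.Dict String (List (Int × List String)))
    (L : List (String × List (Int × List String))) : PySem.Dict String (List (Int × List String)) :=
  L.foldl (fun d nb => d.insert nb.1 nb.2) sd

theorem pvPairs_length (xs : List Int) (e : Int) : (pvPairs xs e).length = xs.length := by
  rcases xs with _ | ⟨a, t⟩ <;> simp [pvPairs]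

theorem pv_lookup_of_mem (fd : List (Int × String)) (hnd : (fd.map Prod.fst).Nodup)
    {a : Int} {l : String} (h : (a, l) ∈ fd) : (PySem.Dict.mk fd).getD a "" = l :=
  PySem.Dict.getD_of_mem_items _ h (by simpa [PySem.Dict.keys] using hnd) ""

-- A's loop body, after the break guard and the index arithmetic are gone
def pvFA (fd : List (Int × String)) (sd : PySem.Dict String (List (Int × List String)))
    (q : Int × Int) : PySem.Dict String (List (Int × List String)) :=
  let lines : List Int := PySem.List.pyRange q.1 q.2 1
  let head_line : String := (PySem.Dict.mk fd).getD (PySem.List.pyGetD lines 0 0) ""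
  let section_name : String :=
    if head_line == "[ dihedrals ]" && sd.contains "[ dihedrals ]" then "[ impropers ]"
    else head_line
  let subset := fd.filter (fun p => (PySem.List.slice lines (some 1) none).contains p.1)
  sd.insert section_name (subset.map (fun p => (p.1, PySem.Str.split₀ p.2)))

theorem pvPairs_cons (a : Int) (ts : List Int) (e : Int) :
    pvPairs (a :: ts) e = (a, (ts ++ [e]).head (by simp)) :: pvPairs ts e := by
  rcases ts with _ | ⟨b, t⟩ <;> simp [pvPairs]

theorem pvFA_step (fd : List (Int × String)) (hnd : (fd.map Prod.fst).Nodup)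
    (sd : PySem.Dict String (List (Int × List String))) (seen : Bool)
    (hseen : sd.contains "[ dihedrals ]" = seen)
    (a hd : Int) (l : String) (hmem : (a, l) ∈ fd) (ha : a < hd) :
    pvFA fd sd (a, hd)
      = sd.insert (if l = "[ dihedrals ]" then (if seen then "[ impropers ]" else l) else l)
          (pvIv fd a hd) := by
  have hlines : PySem.List.pyRange a hd 1 = a :: PySem.List.pyRange (a + 1) hd 1 :=
    PySem.List.pyRange_one_cons ha
  unfold pvFA
  simp only [hlines]
  have hget : PySem.List.pyGetD (a :: PySem.List.pyRange (a + 1) hd 1) 0 0 = a := by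
    rw [PySem.List.pyGetD_eq_getElem _ _ (by omega) (by simp)]
    simp
  rw [hget, pv_lookup_of_mem fd hnd hmem]
  have hsl : PySem.List.slice (a :: PySem.List.pyRange (a + 1) hd 1) (some 1) none
      = PySem.List.pyRange (a + 1) hd 1 := by
    rw [PySem.List.slice_from_one]
    rfl
  rw [hsl]
  have hfil : fd.filter (fun p => (PySem.List.pyRange (a + 1) hd 1).contains p.1)
      = fd.filter (fun p => decide (a < p.1) && decide (p.1 < hd)) := by
    apply List.filter_congr
    intro p _
    rw [Bool.eq_iff_iff]
    simp only [List.contains_iff_mem, PySem.List.mem_pyRange_one, Bool.and_eq_true,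
      decide_eq_true_eq]
    omega
  rw [hfil, hseen]
  congr 1
  by_cases hl : l = "[ dihedrals ]"
  · subst hl
    cases seen <;> simp
  · simp [hl, beq_eq_false_iff_ne.mpr hl]

theorem pv_loopA (fd : List (Int × String)) (hnd : (fd.map Prod.fst).Nodup) :
    ∀ (hs : List (Int × String)) (e : Int) (sd : PySem.Dict String (List (Int × List String)))
      (seen : Bool),
      (∀ p ∈ hs, p ∈ fd) →
      List.IsChain (· < ·) ((hs.map Prod.fst) ++ [e]) →
      sd.contains "[ dihedrals ]" = seen →
      (pvPairs (hs.map Prod.fst) e).foldl (pvFA fd) sd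
        = pvDFold sd ((pvNames seen (hs.map Prod.snd)).zip
            ((pvPairs (hs.map Prod.fst) e).map (fun q => pvIv fd q.1 q.2))) := by
  intro hs
  induction hs with
  | nil => intro e sd seen _ _ _; simp [pvPairs, pvNames, pvDFold]
  | cons p tl ih =>
      intro e sd seen hsub hchain hseen
      obtain ⟨a, l⟩ := p
      set ts := tl.map Prod.fst with hts
      have hchain' : List.IsChain (· < ·) (ts ++ [e]) := by
        simp only [List.map_cons, List.cons_append] at hchain
        exact (List.isChain_cons.mp hchain).2
      have hhd : a < (ts ++ [e]).head (by simp) := by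
        simp only [List.map_cons, List.cons_append] at hchain
        have h1 := (List.isChain_cons.mp hchain).1
        exact h1 _ (by rw [Option.mem_def, List.head?_eq_some_head])
      simp only [List.map_cons, hts.symm]
      rw [pvPairs_cons]
      simp only [List.foldl_cons, List.map_cons]
      rw [pvFA_step fd hnd sd seen hseen a _ l (hsub _ (by simp)) hhd]
      rw [pvNames]
      set nm := if l = "[ dihedrals ]" then (if seen then "[ impropers ]" else l) else l with hnm
      have hseen' : (sd.insert nm (pvIv fd a ((ts ++ [e]).head (by simp)))).contains "[ dihedrals ]"
          = (seen || (l == "[ dihedrals ]")) := by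
        rw [PySem.Dict.contains_insert]
        by_cases hl : l = "[ dihedrals ]"
        · subst hl
          cases seen
          · simp [hnm, hseen]
          · have h2 : ("[ dihedrals ]" == "[ impropers ]") = false := by decide
            simp [hnm, h2, hseen]
        · have h2 : ("[ dihedrals ]" == l) = false := beq_eq_false_iff_ne.mpr (Ne.symm hl)
          have h3 : (l == "[ dihedrals ]") = false := beq_eq_false_iff_ne.mpr hl
          simp [hnm, hl, h2, h3, hseen]
      rw [ih e _ _ (fun q hq => hsub q (by simp [hq])) hchain' hseen']
      simp only [List.zip_cons_cons, pvDFold, List.foldl_cons]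

theorem pvBsearch_bounds (starts : List Int) (k : Int) (lo hi : Nat) (h : lo ≤ hi) :
    lo ≤ pvBsearch starts k lo hi ∧ pvBsearch starts k lo hi ≤ hi := by
  fun_induction pvBsearch starts k lo hi with
  | case1 lo hi hlt mid hm ih =>
      have h2 := ih (by omega)

      omega
  | case2 lo hi hlt mid hm ih =>
      have h2 := ih (by omega)

      omega
  | case3 lo hi hlt =>
      omega

theorem pvBsearch_spec (starts : List Int) (k : Int) (lo hi : Nat)
    (hhi : hi ≤ starts.length) (hlo : lo ≤ hi) (hmono : List.Pairwise (· < ·) starts) :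
    (∀ j, lo ≤ j → j < pvBsearch starts k lo hi → starts.getD j 0 < k) ∧
    (∀ j, pvBsearch starts k lo hi ≤ j → j < hi → ¬ starts.getD j 0 < k) := by
  have hmget : ∀ (i j : Nat), i ≤ j → j < starts.length → starts.getD i 0 ≤ starts.getD j 0 := by
    intro i j hij hj
    rcases Nat.eq_or_lt_of_le hij with rfl | hlt2
    · exact le_refl _
    · rw [List.getD_eq_getElem _ _ (by omega), List.getD_eq_getElem _ _ hj]
      exact le_of_lt (List.pairwise_iff_getElem.mp hmono i j (by omega) hj hlt2)
  fun_induction pvBsearch starts k lo hi with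
  | case1 lo hi hlt mid hm ih =>
      have hb := pvBsearch_bounds starts k (mid + 1) hi (by omega)

      obtain ⟨ih1, ih2⟩ := ih (by omega) (by omega)
      refine ⟨?_, ih2⟩
      intro j hj hjr
      by_cases hc : mid + 1 ≤ j
      · exact ih1 j hc hjr
      · exact lt_of_le_of_lt (hmget j mid (by omega) (by omega)) hm
  | case2 lo hi hlt mid hm ih =>
      have hb := pvBsearch_bounds starts k lo mid (by omega)

      obtain ⟨ih1, ih2⟩ := ih (by omega) (by omega)
      refine ⟨ih1, ?_⟩
      intro j hj hjhi
      by_cases hc : j < mid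
      · exact ih2 j hj hc
      · intro hcon
        exact hm (lt_of_le_of_lt (hmget mid j (by omega) (by omega)) hcon)
  | case3 lo hi hlt =>
      exact ⟨fun j h1 h2 => absurd h2 (by omega), fun j h1 h2 => absurd h2 (by omega)⟩

-- B's bucket loop, characterised through getD
def pvStepB (starts : List Int) (bs : List (List (Int × List String))) (p : Int × String) :
    List (List (Int × List String)) :=
  if PySem.Str.isIn "[" p.2 then bs
  else
    let lo := pvBsearch starts p.1 0 starts.length
    if 0 < lo then bs.set (lo - 1) (bs.getD (lo - 1) [] ++ [(p.1, PySem.Str.split₀ p.2)])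
    else bs

def pvCondB (starts : List Int) (p : Int × String) (i : Nat) : Bool :=
  !pvHdr p && (pvBsearch starts p.1 0 starts.length == i + 1)

theorem pv_bucketsFold (starts : List Int) (l : List (Int × String)) :
    ∀ (bs : List (List (Int × List String))), starts.length ≤ bs.length →
      (l.foldl (pvStepB starts) bs).length = bs.length ∧
      ∀ i : Nat, (l.foldl (pvStepB starts) bs).getD i []
          = bs.getD i [] ++ (l.filter (fun p => pvCondB starts p i)).map
              (fun p => (p.1, PySem.Str.split₀ p.2)) := by
  induction l with
  | nil => intro bs _; simp
  | cons p t ih =>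
      intro bs hlen
      have hstep_len : (pvStepB starts bs p).length = bs.length := by
        unfold pvStepB; dsimp only; split_ifs <;> simp
      obtain ⟨ihl, ihg⟩ := ih (pvStepB starts bs p) (by omega)
      constructor
      · simp only [List.foldl_cons]; rw [ihl, hstep_len]
      · intro i
        simp only [List.foldl_cons, List.filter_cons]
        rw [ihg i]
        by_cases hhdr : pvHdr p
        · have : pvCondB starts p i = false := by simp [pvCondB, hhdr]
          simp only [this, Bool.false_eq_true, if_neg, not_false_iff]
          unfold pvStepB pvHdr at *
          rw [if_pos hhdr]
        · set r := pvBsearch starts p.1 0 starts.length with hr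
          have hb := pvBsearch_bounds starts p.1 0 starts.length (by omega)
          have hstep : pvStepB starts bs p =
              if 0 < r then bs.set (r - 1) (bs.getD (r - 1) [] ++ [(p.1, PySem.Str.split₀ p.2)]) else bs := by
            unfold pvStepB pvHdr at *; rw [if_neg (by simpa using hhdr)]
          have hcond : pvCondB starts p i = (r == i + 1) := by simp [pvCondB, hhdr, hr]
          rw [hcond, hstep]
          by_cases hri : r = i + 1
          · have h0 : 0 < r := by omega
            rw [if_pos h0]
            have : r - 1 = i := by omega
            rw [this]
            have hilt : i < bs.length := by omega
            have hset : (bs.set i (bs.getD i [] ++ [(p.1, PySem.Str.split₀ p.2)])).getD i []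
                = bs.getD i [] ++ [(p.1, PySem.Str.split₀ p.2)] := by
              rw [List.getD_eq_getElem _ _ (by simpa using hilt), List.getElem_set_self]
            rw [hset, hri]
            simp [List.append_assoc]
          · have : (r == i + 1) = false := by simp [hri]
            rw [this]
            simp only [Bool.false_eq_true, if_neg, not_false_iff]
            split_ifs with h0
            · rw [List.getD_eq_getElem?_getD, List.getD_eq_getElem?_getD,
                  List.getElem?_set_ne (by omega), ← List.getD_eq_getElem?_getD]
            · rfl

theorem pvPairs_getD (xs : List Int) (e : Int) (i : Nat) (hi : i < xs.length) :
    (pvPairs xs e).getD i (0, 0)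
      = (xs.getD i 0, if i + 1 < xs.length then xs.getD (i + 1) 0 else e) := by
  have hlen : (xs.tail ++ [e]).length = xs.length := by
    rcases xs with _ | ⟨a, t⟩ <;> simp_all
  have hz : (pvPairs xs e).length = xs.length := by
    simp [pvPairs, List.length_zip, hlen]
  simp only [pvPairs] at hz ⊢
  rw [List.getD_eq_getElem _ _ (by omega), List.getElem_zip]
  rw [List.getD_eq_getElem _ _ hi]
  congr 1
  by_cases hc : i + 1 < xs.length
  · rw [List.getD_eq_getElem _ _ hc, if_pos hc]
    rw [List.getElem_append_left (by simp only [List.length_tail]; omega)]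
    rcases xs with _ | ⟨a, t⟩
    · simp at hi
    · simp
  · rw [if_neg hc]
    have : i = xs.length - 1 := by omega
    subst this
    rw [List.getElem_append_right (by simp only [List.length_tail]; omega)]
    simp [List.length_tail]

theorem pv_condB_iff (fd : List (Int × String)) (e : Int)
    (hnd : (fd.map Prod.fst).Nodup)
    (hlt : ∀ p ∈ fd, p.1 < e)
    (hmono : List.Pairwise (· < ·) (((fd.filter pvHdr).map Prod.fst) ++ [e]))
    (p : Int × String) (hp : p ∈ fd) (i : Nat)
    (hi : i < ((fd.filter pvHdr).map Prod.fst).length) :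
    pvCondB ((fd.filter pvHdr).map Prod.fst) p i
      = (decide (((pvPairs ((fd.filter pvHdr).map Prod.fst) e).getD i (0,0)).1 < p.1) &&
         decide (p.1 < ((pvPairs ((fd.filter pvHdr).map Prod.fst) e).getD i (0,0)).2)) := by
  set xs := (fd.filter pvHdr).map Prod.fst with hxs
  have hmono' : List.Pairwise (· < ·) xs := (List.pairwise_append.mp hmono).1
  have hmget : ∀ (j1 j2 : Nat), j1 < j2 → j2 < xs.length → xs.getD j1 0 < xs.getD j2 0 := by
    intro j1 j2 h12 hj2
    rw [List.getD_eq_getElem _ _ (by omega), List.getD_eq_getElem _ _ hj2]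
    exact List.pairwise_iff_getElem.mp hmono' j1 j2 (by omega) hj2 h12
  have hmle : ∀ (j1 j2 : Nat), j1 ≤ j2 → j2 < xs.length → xs.getD j1 0 ≤ xs.getD j2 0 := by
    intro j1 j2 h12 hj2
    rcases Nat.eq_or_lt_of_le h12 with rfl | h
    · exact le_refl _
    · exact le_of_lt (hmget j1 j2 h hj2)
  have hkeyinj : ∀ q ∈ fd, q.1 = p.1 → q = p := fun q hq hqe =>
    List.inj_on_of_nodup_map hnd hq hp hqe
  have hstarts : ∀ j, j < xs.length → ∃ q ∈ fd, pvHdr q = true ∧ xs.getD j 0 = q.1 := by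
    intro j hj
    rw [List.getD_eq_getElem _ _ hj]
    have hmem : xs[j] ∈ xs := List.getElem_mem hj
    obtain ⟨q, hq, hq2⟩ := List.mem_map.mp hmem
    exact ⟨q, (List.mem_filter.mp hq).1, (List.mem_filter.mp hq).2, hq2.symm⟩
  rw [pvPairs_getD _ _ _ hi]
  set r := pvBsearch xs p.1 0 xs.length with hr
  obtain ⟨hs1, hs2⟩ := pvBsearch_spec xs p.1 0 xs.length (le_refl _) (by omega) hmono'
  obtain ⟨hb0, hbS⟩ := pvBsearch_bounds xs p.1 0 xs.length (by omega)
  have key : (pvHdr p = false ∧ r = i + 1) ↔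
      (xs.getD i 0 < p.1 ∧ p.1 < (if i + 1 < xs.length then xs.getD (i+1) 0 else e)) := by
    constructor
    · rintro ⟨hnh, hri⟩
      refine ⟨hs1 i (by omega) (by omega), ?_⟩
      by_cases hc : i + 1 < xs.length
      · rw [if_pos hc]
        have hle : ¬ xs.getD (i+1) 0 < p.1 := hs2 (i+1) (by omega) hc
        rcases lt_or_eq_of_le (le_of_not_gt hle) with h | h
        · exact h
        · exfalso
          obtain ⟨q, hq, hqh, hqe⟩ := hstarts (i+1) hc
          have hqp : q = p := hkeyinj q hq (by omega)
          rw [hqp, hnh] at hqh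
          exact Bool.false_ne_true hqh
      · rw [if_neg hc]; exact hlt p hp
    · rintro ⟨hA, hB⟩
      have hnh : pvHdr p = false := by
        by_contra hcon
        have hh : pvHdr p = true := by revert hcon; cases pvHdr p <;> simp
        have hpmem : p.1 ∈ xs := by
          exact List.mem_map.mpr ⟨p, List.mem_filter.mpr ⟨hp, hh⟩, rfl⟩
        obtain ⟨j, hj, hje⟩ := List.mem_iff_getElem.mp hpmem
        have hje' : xs.getD j 0 = p.1 := by rw [List.getD_eq_getElem _ _ hj, hje]
        rcases lt_or_ge i j with hij | hij
        · have hjS : i + 1 < xs.length := by omega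
          rw [if_pos hjS] at hB
          have hle2 : xs.getD (i+1) 0 ≤ xs.getD j 0 := hmle (i+1) j (by omega) hj
          omega
        · have hle2 : xs.getD j 0 ≤ xs.getD i 0 := hmle j i hij (by omega)
          omega
      refine ⟨hnh, ?_⟩
      by_contra hne
      rcases lt_or_ge r (i+1) with h1 | h1
      · exact absurd hA (hs2 i (by omega) (by omega))
      · have h2 : i + 1 < r := by omega
        have hjS : i + 1 < xs.length := by omega
        rw [if_pos hjS] at hB
        have := hs1 (i+1) (by omega) h2
        omega
  rw [Bool.eq_iff_iff]
  simp only [pvCondB, Bool.and_eq_true, Bool.not_eq_true', beq_iff_eq, decide_eq_true_eq, ← hr]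
  exact key

theorem pv_pyGet_last (l : List Int) (x : Int) :
    PySem.List.pyGet? (l ++ [x]) (-1) = some x := by
  simp [PySem.List.pyGet?, PySem.List.pyIdx?]

theorem pv_getD_append_left (xs : List Int) (e : Int) (n : Nat) (h : n < xs.length) :
    PySem.List.pyGetD (xs ++ [e]) (n : Int) 0 = xs.getD n 0 := by
  rw [PySem.List.pyGetD_eq_getElem _ _ (by omega) (by simp; omega)]
  simp only [Int.toNat_natCast]
  rw [List.getElem_append_left h, List.getD_eq_getElem _ _ h]

theorem pv_getD_append (xs : List Int) (e : Int) (n : Nat) (h : n ≤ xs.length) :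
    PySem.List.pyGetD (xs ++ [e]) (n : Int) 0
      = if n < xs.length then xs.getD n 0 else e := by
  by_cases hc : n < xs.length
  · rw [if_pos hc, pv_getD_append_left xs e n hc]
  · rw [if_neg hc]
    have hn : n = xs.length := by omega
    subst hn
    rw [PySem.List.pyGetD_eq_getElem _ _ (by omega) (by simp)]
    simp only [Int.toNat_natCast]
    rw [List.getElem_append_right (by omega)]
    simp

theorem portA_eq (file_dict : List (Int × String)) (mx : Int)
    (hmx : PySem.List.max? (file_dict.map Prod.fst) (fun x => x) = some mx)
    (hpre : Pre_get_sections_dict file_dict) :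
    get_sections_dict file_dict = (pvDFold PySem.Dict.empty (pvSecs file_dict (mx + 1))).items := by
  obtain ⟨hne, hnd, hchain0⟩ := hpre
  simp only [get_sections_dict]
  split
  case h_1 h => rw [hmx] at h; cases h
  case h_2 mx' h =>
  rw [hmx] at h
  injection h with h
  subst h
  have hsec : file_dict.foldl
      (fun acc p => if PySem.Str.isIn "[" p.2 then acc ++ [p.1] else acc) []
      = (file_dict.filter pvHdr).map Prod.fst := by
    simpa [pvHdr] using
      PySem.List.foldl_append_if (fun p : Int × String => PySem.Str.isIn "[" p.2) Prod.fst file_dict []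
  rw [hsec]
  set xs := (file_dict.filter pvHdr).map Prod.fst with hxs
  set S := xs.length with hS
  set P := pvPairs xs (mx + 1) with hP
  -- every key (so every section start) is at most mx
  have hkey_le : ∀ y ∈ file_dict.map Prod.fst, y ≤ mx := fun y hy =>
    PySem.List.max?_isMax hmx y hy
  have hxs_sub : ∀ y ∈ xs, y ∈ file_dict.map Prod.fst := by
    intro y hy
    obtain ⟨q, hq, hq2⟩ := List.mem_map.mp hy
    exact List.mem_map.mpr ⟨q, List.mem_of_mem_filter hq, hq2⟩
  have hchain : List.IsChain (· < ·) (xs ++ [mx + 1]) := by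
    rw [List.isChain_append]
    refine ⟨hchain0, by simp, ?_⟩
    intro x hx y hyo
    simp only [List.head?_cons, Option.mem_def, Option.some.injEq] at hyo
    subst hyo
    have hxm : x ≤ mx := hkey_le x (hxs_sub x (List.mem_of_mem_getLast? hx))
    omega
  have hmono : List.Pairwise (· < ·) (xs ++ [mx + 1]) := List.isChain_iff_pairwise.mp hchain
  -- the appended end marker and the length of the index list
  have hlen : ((xs ++ [mx + 1]).length : Int) = (S : Int) + 1 := by
    simp [hS]
  rw [hlen]
  have hsplit : PySem.List.pyRange 0 ((S : Int) + 1) 1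
      = PySem.List.pyRange 0 (S : Int) 1 ++ [(S : Int)] :=
    PySem.List.pyRange_one_succ_right (by omega)
  rw [hsplit, List.foldl_append]
  -- the final iteration hits the break
  have hlast : PySem.List.pyGet? (PySem.List.pyRange 0 (S : Int) 1 ++ [(S : Int)]) (-1)
      = some (S : Int) := pv_pyGet_last _ _
  rw [hlast]
  simp only [List.foldl_cons, List.foldl_nil, beq_self_eq_true, if_pos]
  -- on every earlier index the guard is false and the body is pvFA of the boundary pair
  have hbody : ∀ (sd : PySem.Dict String (List (Int × List String))),
      ∀ number ∈ PySem.List.pyRange 0 (S : Int) 1,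
      (fun (sd : PySem.Dict String (List (Int × List String))) number =>
        if some number == some (S : Int) then sd
        else
          let lines := PySem.List.pyRange (PySem.List.pyGetD (xs ++ [mx + 1]) number 0)
            (PySem.List.pyGetD (xs ++ [mx + 1]) (number + 1) 0) 1
          let head_line := (PySem.Dict.mk file_dict).getD (PySem.List.pyGetD lines 0 0) ""
          let section_name :=
            if head_line == "[ dihedrals ]" && sd.contains "[ dihedrals ]" then "[ impropers ]"
            else head_line
          let subset := file_dict.filter
            (fun p => (PySem.List.slice lines (some 1) none).contains p.1)
          sd.insert section_name (subset.map (fun p => (p.1, PySem.Str.split₀ p.2)))) sd number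
        = pvFA file_dict sd (PySem.List.pyGetD P number (0, 0)) := by
    intro sd number hmem
    beta_reduce
    obtain ⟨h0, h1⟩ := PySem.List.mem_pyRange_one.mp hmem
    have hnum : number = ((number.toNat : Nat) : Int) := by omega
    set n := number.toNat with hn
    have hnS : n < S := by omega
    have hguard : (some number == some (S : Int)) = false := by
      simp only [beq_eq_false_iff_ne, ne_eq, Option.some.injEq]
      omega
    rw [hguard]
    simp only [Bool.false_eq_true, if_neg, not_false_iff]
    have hg1 : PySem.List.pyGetD (xs ++ [mx + 1]) number 0 = xs.getD n 0 := by
      rw [hnum, pv_getD_append_left xs (mx + 1) n (by omega)]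
    have hg2 : PySem.List.pyGetD (xs ++ [mx + 1]) (number + 1) 0
        = if n + 1 < S then xs.getD (n + 1) 0 else mx + 1 := by
      have : number + 1 = ((n + 1 : Nat) : Int) := by omega
      rw [this, pv_getD_append xs (mx + 1) (n + 1) (by omega)]
    have hgp : PySem.List.pyGetD P number (0, 0)
        = (xs.getD n 0, if n + 1 < S then xs.getD (n + 1) 0 else mx + 1) := by
      rw [hnum]
      rw [show PySem.List.pyGetD P ((n : Nat) : Int) (0, 0) = P.getD n (0, 0) from by
        rw [PySem.List.pyGetD_eq_getElem _ _ (by omega)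
              (by rw [hP, pvPairs_length]; exact_mod_cast hnS),
            List.getD_eq_getElem _ _ (by rw [hP, pvPairs_length]; exact hnS)]
        simp only [Int.toNat_natCast]]
      rw [hP, pvPairs_getD xs (mx + 1) n hnS]
    rw [hgp, hg1, hg2]
    rfl
  rw [PySem.List.foldl_congr_mem _ _ _ _ hbody]
  have hplen : (S : Int) = (P.length : Int) := by
    rw [hP, pvPairs_length]
  rw [hplen, PySem.List.foldl_pyRange_zero_pyGetD' P (0, 0) (pvFA file_dict) PySem.Dict.empty]
  rw [pv_loopA file_dict hnd (file_dict.filter pvHdr) (mx + 1) PySem.Dict.empty false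
        (fun p hp => List.mem_of_mem_filter hp) (by simpa [hxs] using hchain)
        (PySem.Dict.contains_empty _)]
  rfl

theorem pvNamesAux (hs : List (Int × String)) : ∀ (acc : List String) (seen : Bool),
    (hs.foldl (fun (acc : List String × Bool) p =>
        if p.2 == "[ dihedrals ]" then
          (acc.1 ++ [if acc.2 then "[ impropers ]" else p.2], true)
        else (acc.1 ++ [p.2], acc.2)) (acc, seen)).1
      = acc ++ pvNames seen (hs.map Prod.snd) := by
  induction hs with
  | nil => intro acc seen; simp [pvNames]
  | cons p tl ih =>
      intro acc seen
      simp only [List.foldl_cons, List.map_cons]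
      rw [pvNames]
      by_cases h : p.2 = "[ dihedrals ]"
      · have hb : (p.2 == "[ dihedrals ]") = true := beq_iff_eq.mpr h
        rw [hb, if_pos rfl, ih, if_pos h]
        simp
      · have hb : (p.2 == "[ dihedrals ]") = false := beq_eq_false_iff_ne.mpr h
        rw [hb]
        simp only [Bool.false_eq_true, if_neg, not_false_iff, if_neg h]
        rw [ih]
        simp

theorem portB_eq (file_dict : List (Int × String)) (mx : Int)
    (hmx : PySem.List.max? (file_dict.map Prod.fst) (fun x => x) = some mx)
    (hpre : Pre_get_sections_dict file_dict) :
    get_sections_dict_alt file_dict = (pvDFold PySem.Dict.empty (pvSecs file_dict (mx + 1))).items := by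
  obtain ⟨hne, hnd, hchain0⟩ := hpre
  simp only [get_sections_dict_alt]
  set hs := file_dict.filter (fun p => PySem.Str.isIn "[" p.2) with hhs
  set xs := hs.map Prod.fst with hxs
  set S := xs.length with hS
  rw [pvNamesAux hs [] false]
  simp only [List.nil_append]
  -- keys are bounded by mx, headers are strictly increasing, so starts ++ [mx+1] is sorted
  have hkey_le : ∀ y ∈ file_dict.map Prod.fst, y ≤ mx := fun y hy =>
    PySem.List.max?_isMax hmx y hy
  have hlt : ∀ p ∈ file_dict, p.1 < mx + 1 := by
    intro p hp
    have := hkey_le p.1 (List.mem_map.mpr ⟨p, hp, rfl⟩)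
    omega
  have hxs_sub : ∀ y ∈ xs, y ∈ file_dict.map Prod.fst := by
    intro y hy
    obtain ⟨q, hq, hq2⟩ := List.mem_map.mp hy
    exact List.mem_map.mpr ⟨q, List.mem_of_mem_filter hq, hq2⟩
  have hchain : List.IsChain (· < ·) (xs ++ [mx + 1]) := by
    rw [List.isChain_append]
    refine ⟨hchain0, by simp, ?_⟩
    intro x hx y hyo
    simp only [List.head?_cons, Option.mem_def, Option.some.injEq] at hyo
    subst hyo
    have hxm : x ≤ mx := hkey_le x (hxs_sub x (List.mem_of_mem_getLast? hx))
    omega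
  have hmono : List.Pairwise (· < ·) (xs ++ [mx + 1]) := List.isChain_iff_pairwise.mp hchain
  -- the bucket loop
  obtain ⟨hblen, hbget⟩ :=
    pv_bucketsFold xs file_dict (hs.map (fun _ => [])) (by simp [hxs])
  have hbuckets : file_dict.foldl (pvStepB xs) (hs.map (fun _ => []))
      = (pvPairs xs (mx + 1)).map (fun q => pvIv file_dict q.1 q.2) := by
    apply List.ext_getElem
    · rw [hblen]
      simp only [List.length_map, pvPairs_length]
      simp [hxs]
    · intro i hi1 hi2
      have hiS : i < S := by
        rw [hblen] at hi1
        simp only [List.length_map] at hi1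
        simp [hS, hxs, hi1]
      have hgd : (file_dict.foldl (pvStepB xs) (hs.map (fun _ => []))).getD i []
          = (hs.map (fun _ => ([] : List (Int × List String)))).getD i []
            ++ (file_dict.filter (fun p => pvCondB xs p i)).map
                (fun p => (p.1, PySem.Str.split₀ p.2)) := hbget i
      have hz : (hs.map (fun _ => ([] : List (Int × List String)))).getD i [] = [] := by
        rcases lt_or_ge i (hs.map (fun _ => ([] : List (Int × List String)))).length with hc | hc
        · rw [List.getD_eq_getElem _ _ hc, List.getElem_map]
        · rw [List.getD_eq_default _ _ hc]
      rw [← List.getD_eq_getElem _ ([] : List (Int × List String)) hi1, hgd, hz, List.nil_append]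
      have hplen : i < (pvPairs xs (mx + 1)).length := by rw [pvPairs_length]; exact hiS
      have hrhs : ((pvPairs xs (mx + 1)).map (fun q => pvIv file_dict q.1 q.2))[i]'hi2
          = pvIv file_dict ((pvPairs xs (mx + 1)).getD i (0, 0)).1
              ((pvPairs xs (mx + 1)).getD i (0, 0)).2 := by
        rw [List.getElem_map, List.getD_eq_getElem _ _ hplen]
      rw [hrhs]
      have hfil : file_dict.filter (fun p => pvCondB xs p i)
          = file_dict.filter (fun p =>
              decide (((pvPairs xs (mx + 1)).getD i (0,0)).1 < p.1) &&
              decide (p.1 < ((pvPairs xs (mx + 1)).getD i (0,0)).2)) := by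
        apply List.filter_congr
        intro p hp
        have hcb := pv_condB_iff file_dict (mx + 1) hnd hlt hmono p hp i hiS
        exact hcb
      rw [hfil]
      rfl
  have hsb : (fun (bs : List (List (Int × List String))) (p : Int × String) =>
      if PySem.Str.isIn "[" p.2 then bs
      else
        if 0 < pvBsearch xs p.1 0 S then
          bs.set (pvBsearch xs p.1 0 S - 1)
            (bs.getD (pvBsearch xs p.1 0 S - 1) [] ++ [(p.1, PySem.Str.split₀ p.2)])
        else bs) = pvStepB xs := by
    funext bs p
    rfl
  rw [hsb, hbuckets]
  rfl

-- ===== VERDICT (by name: the statement is the Claim_ definition above) =====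
theorem get_sections_dict_spec : Claim_equal_get_sections_dict := by
  intro fd _ hpre
  unfold Spec_get_sections_dict
  rcases hne : PySem.List.max? (fd.map Prod.fst) (fun x => x) with _ | mx
  · exact absurd ((PySem.List.max?_eq_none_iff _ _).mp hne) (by
      intro h; exact hpre.1 (by simpa using h))
  · rw [portA_eq fd mx hne hpre, portB_eq fd mx hne hpre]
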